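-- pv_equiv track=rewrite | github.com/Aekanat/DNA-Fullstack | dna_back/utils/dbHandler.py | sort_chromosomes
-- ===== SOURCE A (Python) =====
-- def sort_chromosomes(chromosomes: list) -> list:
--     allowed = [str(i) for i in range(1, 23)] + ['X']
--     filtered = [c for c in chromosomes if c in allowed]
--     def chrom_key(chrom):
--         if chrom.isdigit():
--             return int(chrom)
--         elif chrom == 'X':
--             return 23
--
--     return sorted(filtered, key=chrom_key)
-- ===== SOURCE B (Python) =====
-- def sort_chromosomes(chromosomes: list) -> list:
--     # One counting pass, then emit the 23 fixed buckets in order: O(n) instead of sort.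
--     counts = {}
--     for c in chromosomes:
--         counts[c] = counts.get(c, 0) + 1
--     out = []
--     for i in range(1, 23):
--         out += [str(i)] * counts.get(str(i), 0)
--     out += ['X'] * counts.get('X', 0)
--     return out
-- ===== Notes on version B (the rewrite author's own statement) =====
-- stated objective: faster
-- what changed: replaces filter + comparison sort with a single counting pass over the input and emission of the 23 fixed chromosome buckets in key order (a counting sort; the allowed-list membership scan and the sort disappear)
import Mathlib
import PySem

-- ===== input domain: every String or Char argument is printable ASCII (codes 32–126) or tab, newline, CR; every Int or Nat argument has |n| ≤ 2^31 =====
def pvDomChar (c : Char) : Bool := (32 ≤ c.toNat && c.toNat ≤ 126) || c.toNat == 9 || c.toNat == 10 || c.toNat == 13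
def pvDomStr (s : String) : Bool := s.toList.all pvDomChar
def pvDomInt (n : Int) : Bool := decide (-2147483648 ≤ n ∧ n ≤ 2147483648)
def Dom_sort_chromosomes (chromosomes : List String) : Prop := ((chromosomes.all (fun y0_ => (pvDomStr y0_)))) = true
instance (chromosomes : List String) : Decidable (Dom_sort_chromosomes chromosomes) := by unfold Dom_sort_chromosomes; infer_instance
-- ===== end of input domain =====

-- B replaces A's filter + comparison sort by one counting pass and emission of the 23 fixed buckets in key order (counting sort, O(n)).

-- ===== PORT A =====
-- allowed = [str(i) for i in range(1, 23)] + ['X']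
def chromAllowed : List String := ((PySem.List.pyRange 1 23 1).map PySem.Int.toStr) ++ ["X"]

-- def chrom_key(chrom): if chrom.isdigit(): return int(chrom) elif chrom == 'X': return 23
-- (Python returns None on any other string, which sorted() never feeds it since the list was filtered to `allowed`;
--  the final 0 is that unreachable branch.)
def chromKeyA (chrom : String) : Int :=
  if PySem.Str.strIsdigit chrom then (PySem.Int.ofStr? chrom).getD 0
  else if chrom == "X" then 23
  else 0

def sort_chromosomes (chromosomes : List String) : List String :=
  let filtered := chromosomes.filter (fun c => chromAllowed.contains c)
  PySem.List.sorted filtered chromKeyA false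

-- ===== PORT B =====
def sort_chromosomes_alt (chromosomes : List String) : List String :=
  let counts := chromosomes.foldl (fun d c => d.insert c (d.getD c 0 + 1)) PySem.Dict.empty
  let out := (PySem.List.pyRange 1 23 1).foldl
    (fun acc i => acc ++ PySem.List.pyRepeat [PySem.Int.toStr i] (counts.getD (PySem.Int.toStr i) 0)) []
  out ++ PySem.List.pyRepeat ["X"] (counts.getD "X" 0)

-- ===== PRECONDITION & SPEC =====
def Spec_sort_chromosomes (chromosomes : List String) (out : List String) : Prop := out = sort_chromosomes_alt chromosomes
instance (chromosomes : List String) (out : List String) : Decidable (Spec_sort_chromosomes chromosomes out) := by unfold Spec_sort_chromosomes; infer_instance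

-- ===== CLAIM (what is proved, stated in full; the proofs are below) =====
def Claim_equal_sort_chromosomes : Prop := ∀ (chromosomes : List String), Dom_sort_chromosomes chromosomes → Spec_sort_chromosomes chromosomes (sort_chromosomes chromosomes)

-- ===== LEMMAS AND PROOFS =====

-- the common "bucketed" normal form both sides are reduced to
def buckets (xs : List String) : List String :=
  chromAllowed.flatMap (fun k => List.replicate (xs.count k) k)

-- B in bucketed normal form
lemma alt_eq_buckets (xs : List String) : sort_chromosomes_alt xs = buckets xs := by
  simp [sort_chromosomes_alt, buckets, chromAllowed, PySem.List.pyRepeat_singleton,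
    PySem.Dict.getD_foldl_insert_add_one, List.flatMap, Function.comp_def]

lemma chromAllowed_eq : chromAllowed =
    ["1","2","3","4","5","6","7","8","9","10","11","12","13","14","15","16","17","18","19","20","21","22","X"] := by
  decide

lemma count_flatMap_replicate (L : List String) (hL : L.Nodup) (f : String → Nat) (v : String) :
    (L.flatMap (fun k => List.replicate (f k) k)).count v = if v ∈ L then f v else 0 := by
  induction L with
  | nil => simp
  | cons a t ih =>
    rcases List.nodup_cons.1 hL with ⟨ha, ht⟩
    rw [List.flatMap_cons, List.count_append, List.count_replicate, ih ht]
    by_cases h : v = a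
    · subst h; simp [ha]
    · simp [h, Ne.symm h]

lemma pairwise_flatMap_replicate (L : List String) (f : String → Nat) (key : String → Int)
    (h : L.Pairwise (fun a b => key a ≤ key b)) :
    (L.flatMap (fun k => List.replicate (f k) k)).Pairwise (fun a b => key a ≤ key b) := by
  induction L with
  | nil => simp
  | cons a t ih =>
    rcases List.pairwise_cons.1 h with ⟨hat, ht⟩
    rw [List.flatMap_cons]
    refine List.pairwise_append.2 ⟨List.pairwise_replicate.2 (Or.inr le_rfl), ih ht, ?_⟩
    intro x hx y hy
    rcases List.eq_of_mem_replicate hx with rfl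
    rcases List.mem_flatMap.1 hy with ⟨k, hk, hyk⟩
    rcases List.eq_of_mem_replicate hyk with rfl
    exact hat _ hk

-- key is injective on chromAllowed via this explicit inverse
def chromOfKey (k : Int) : String := if k = 23 then "X" else PySem.Int.toStr k

lemma chromOfKey_key : ∀ c ∈ chromAllowed, chromOfKey (chromKeyA c) = c := by
  rw [chromAllowed_eq]; decide

lemma chromAllowed_nodup : chromAllowed.Nodup := by rw [chromAllowed_eq]; decide

lemma chromAllowed_pairwise : chromAllowed.Pairwise (fun a b => chromKeyA a ≤ chromKeyA b) := by
  rw [chromAllowed_eq]; decide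

lemma mem_buckets (xs : List String) {v : String} (hv : v ∈ buckets xs) : v ∈ chromAllowed := by
  rcases List.mem_flatMap.1 hv with ⟨k, hk, hvk⟩
  rcases List.eq_of_mem_replicate hvk with rfl
  exact hk

lemma perm_filter_buckets (xs : List String) :
    (xs.filter (fun c => chromAllowed.contains c)).Perm (buckets xs) := by
  rw [List.perm_iff_count]
  intro v
  rw [buckets, count_flatMap_replicate _ chromAllowed_nodup]
  by_cases hv : v ∈ chromAllowed
  · rw [if_pos hv, List.count_filter (by simpa using hv)]
  · rw [if_neg hv, List.count_eq_zero]
    intro hmem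
    exact hv (by simpa using (List.mem_filter.1 hmem).2)

lemma map_eq_self_of_mem_allowed (l : List String) (h : ∀ c ∈ l, c ∈ chromAllowed) :
    l.map (chromOfKey ∘ chromKeyA) = l := by
  conv_rhs => rw [← List.map_id l]
  exact List.map_congr_left (fun c hc => chromOfKey_key c (h c hc))

-- ===== VERDICT (by name: the statement is the Claim_ definition above) =====
theorem sort_chromosomes_spec : Claim_equal_sort_chromosomes := by
  intro xs _
  show sort_chromosomes xs = sort_chromosomes_alt xs
  rw [alt_eq_buckets]
  unfold sort_chromosomes
  set F := xs.filter (fun c => chromAllowed.contains c) with hF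
  set S := PySem.List.sorted F chromKeyA false with hS
  have hSF : S.Perm F := PySem.List.sorted_perm ..
  have hSy : S.Perm (buckets xs) := hSF.trans (perm_filter_buckets xs)
  have hSp : S.Pairwise (fun a b => chromKeyA a ≤ chromKeyA b) := PySem.List.sorted_pairwise ..
  have hyp : (buckets xs).Pairwise (fun a b => chromKeyA a ≤ chromKeyA b) :=
    pairwise_flatMap_replicate _ _ _ chromAllowed_pairwise
  have hmap : S.map chromKeyA = (buckets xs).map chromKeyA :=
    List.Perm.eq_of_pairwise (fun a b _ _ h1 h2 => le_antisymm h1 h2)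
      (List.pairwise_map.2 hSp) (List.pairwise_map.2 hyp) (hSy.map chromKeyA)
  have hSmem : ∀ c ∈ S, c ∈ chromAllowed := by
    intro c hc
    have : c ∈ F := hSF.mem_iff.1 hc
    simpa using (List.mem_filter.1 this).2
  calc S = S.map (chromOfKey ∘ chromKeyA) := (map_eq_self_of_mem_allowed _ hSmem).symm
    _ = (S.map chromKeyA).map chromOfKey := by rw [List.map_map]
    _ = ((buckets xs).map chromKeyA).map chromOfKey := by rw [hmap]
    _ = (buckets xs).map (chromOfKey ∘ chromKeyA) := by rw [List.map_map]
    _ = buckets xs := map_eq_self_of_mem_allowed _ (fun c hc => mem_buckets xs hc)
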